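-- pv_equiv track=rewrite | github.com/guramiivanidze/WizzairBestTrip | wizzair.py | get_only_uniq_prices_for_flights
-- ===== SOURCE A (Python) =====
-- def get_only_uniq_prices_for_flights(outboundflights, returnflights):
--     prices = []
--     for i in outboundflights:
--         prices.append(outboundflights[i]['price'])
--     for i in returnflights:
--         prices.append(returnflights[i]['price'])
--     prices.sort()
--     uniq_prices = list(set(prices))
--     uniq_prices.sort()
--
--     return uniq_prices
-- ===== SOURCE B (Python) =====
-- def get_only_uniq_prices_for_flights(outboundflights, returnflights):
--     vals = sorted([d['price'] for d in outboundflights.values()]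
--                   + [d['price'] for d in returnflights.values()])
--     out = []
--     for x in vals:
--         if not out or out[-1] != x:
--             out.append(x)
--     return out
-- ===== Notes on version B (the rewrite author's own statement) =====
-- stated objective: simpler
-- what changed: B collects prices from dict values directly, sorts once, and removes duplicates in a single linear pass comparing with the last kept element, instead of A's sort / build-a-set / sort-again sequence.
import Mathlib
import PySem

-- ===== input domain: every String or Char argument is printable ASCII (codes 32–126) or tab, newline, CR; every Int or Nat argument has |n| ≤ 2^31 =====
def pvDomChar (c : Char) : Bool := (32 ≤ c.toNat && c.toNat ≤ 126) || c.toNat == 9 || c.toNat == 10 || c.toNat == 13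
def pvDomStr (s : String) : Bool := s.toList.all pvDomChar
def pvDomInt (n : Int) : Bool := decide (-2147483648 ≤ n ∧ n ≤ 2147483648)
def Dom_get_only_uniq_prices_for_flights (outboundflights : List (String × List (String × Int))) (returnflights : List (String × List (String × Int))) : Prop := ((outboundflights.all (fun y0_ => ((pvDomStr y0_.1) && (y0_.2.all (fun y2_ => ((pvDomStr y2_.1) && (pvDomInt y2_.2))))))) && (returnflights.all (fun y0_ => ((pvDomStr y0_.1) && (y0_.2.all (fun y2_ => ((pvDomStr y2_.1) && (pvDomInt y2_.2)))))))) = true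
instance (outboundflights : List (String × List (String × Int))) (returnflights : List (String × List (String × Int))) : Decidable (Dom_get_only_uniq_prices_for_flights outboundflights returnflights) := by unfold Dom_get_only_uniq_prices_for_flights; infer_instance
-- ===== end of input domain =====

-- B collects the prices from the dict values, sorts once and removes duplicates in one
-- linear pass comparing against the last kept element, instead of A's
-- sort / build-a-set / sort-again sequence (objective: simpler).

-- ===== PORT A =====
-- prices = []; for i in outboundflights: prices.append(outboundflights[i]['price']);
-- for i in returnflights: prices.append(returnflights[i]['price']); prices.sort();
-- uniq_prices = list(set(prices)); uniq_prices.sort(); return uniq_prices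
-- (list(set(...)) followed by a key-less sort: the set's hash order cannot influence the result)
def get_only_uniq_prices_for_flights (outboundflights : List (String × List (String × Int))) (returnflights : List (String × List (String × Int))) : List Int :=
  PySem.List.sorted
    (PySem.Set.ofList
      (PySem.List.sorted
        ((PySem.Dict.ofList returnflights).keys.foldl
          (fun acc i => acc ++ [(PySem.Dict.ofList ((PySem.Dict.ofList returnflights).getD i [])).getD "price" 0])
          ((PySem.Dict.ofList outboundflights).keys.foldl
            (fun acc i => acc ++ [(PySem.Dict.ofList ((PySem.Dict.ofList outboundflights).getD i [])).getD "price" 0])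
            []))
        (fun x => x)))
    (fun x => x)

-- ===== PORT B =====
-- vals = sorted([d['price'] for d in outboundflights.values()] + [d['price'] for d in returnflights.values()]);
-- out = []; for x in vals: if not out or out[-1] != x: out.append(x); return out
def get_only_uniq_prices_for_flights_alt (outboundflights : List (String × List (String × Int))) (returnflights : List (String × List (String × Int))) : List Int :=
  (PySem.List.sorted
    (((PySem.Dict.ofList outboundflights).values.map (fun d => (PySem.Dict.ofList d).getD "price" 0))
      ++ ((PySem.Dict.ofList returnflights).values.map (fun d => (PySem.Dict.ofList d).getD "price" 0)))
    (fun x => x)).foldl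
    (fun out x => if out = [] ∨ PySem.List.pyGetD out (-1) 0 ≠ x then out ++ [x] else out) []

-- ===== PRECONDITION & SPEC =====
-- Pre_ excludes inputs where some inner flight dict lacks the key 'price': there Python A raises KeyError.
def Pre_get_only_uniq_prices_for_flights (outboundflights : List (String × List (String × Int))) (returnflights : List (String × List (String × Int))) : Prop :=
  (outboundflights.all (fun p => p.2.any (fun q => q.1 == "price"))
    && returnflights.all (fun p => p.2.any (fun q => q.1 == "price"))) = true
instance (outboundflights : List (String × List (String × Int))) (returnflights : List (String × List (String × Int))) : Decidable (Pre_get_only_uniq_prices_for_flights outboundflights returnflights) := by unfold Pre_get_only_uniq_prices_for_flights; infer_instance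
def pvWitness_get_only_uniq_prices_for_flights : (List (String × List (String × Int))) × (List (String × List (String × Int))) :=
  ([("W6 100", [("price", 49)])], [("W6 101", [("price", 49)]), ("W6 102", [("price", 35)])])

def Spec_get_only_uniq_prices_for_flights (outboundflights : List (String × List (String × Int))) (returnflights : List (String × List (String × Int))) (out : List Int) : Prop := out = get_only_uniq_prices_for_flights_alt outboundflights returnflights
instance (outboundflights : List (String × List (String × Int))) (returnflights : List (String × List (String × Int))) (out : List Int) : Decidable (Spec_get_only_uniq_prices_for_flights outboundflights returnflights out) := by unfold Spec_get_only_uniq_prices_for_flights; infer_instance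

-- ===== CLAIM (what is proved, stated in full; the proofs are below) =====
def Claim_equal_get_only_uniq_prices_for_flights : Prop := ∀ (outboundflights : List (String × List (String × Int))) (returnflights : List (String × List (String × Int))), Dom_get_only_uniq_prices_for_flights outboundflights returnflights → Pre_get_only_uniq_prices_for_flights outboundflights returnflights → Spec_get_only_uniq_prices_for_flights outboundflights returnflights (get_only_uniq_prices_for_flights outboundflights returnflights)

-- ===== LEMMAS AND PROOFS =====

-- in a strictly increasing list every element is ≤ the last one
theorem chain_le_getLast : ∀ (out : List Int), out.Pairwise (· < ·) → ∀ (a : Int), a ∈ out → ∀ (hne : out ≠ []), a ≤ out.getLast hne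
  | [], _, a, ha, _ => absurd ha (by simp)
  | [x], _, a, ha, _ => by simp at ha; simp [ha]
  | x :: y :: s, h, a, ha, hne => by
    rcases List.pairwise_cons.mp h with ⟨hx, ht⟩
    rw [List.getLast_cons (by simp)]
    rcases List.mem_cons.mp ha with rfl | hmem
    · exact le_of_lt (lt_of_lt_of_le (hx y (by simp))
        (chain_le_getLast (y :: s) ht y (by simp) (by simp)))
    · exact chain_le_getLast (y :: s) ht a hmem (by simp)

-- the single-pass dedup fold over a ≤-sorted list: strictly increasing result, membership preserved
theorem dedup_fold_inv (l : List Int) : ∀ (out : List Int),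
    l.Pairwise (· ≤ ·) → out.Pairwise (· < ·) →
    (∀ a ∈ out, ∀ b ∈ l, a ≤ b) →
    (l.foldl (fun out x => if out = [] ∨ PySem.List.pyGetD out (-1) 0 ≠ x then out ++ [x] else out) out).Pairwise (· < ·) ∧
      ∀ x, (x ∈ l.foldl (fun out x => if out = [] ∨ PySem.List.pyGetD out (-1) 0 ≠ x then out ++ [x] else out) out ↔ x ∈ out ∨ x ∈ l) := by
  induction l with
  | nil => intro out _ hout _; exact ⟨hout, fun x => by simp⟩
  | cons v t ih =>
    intro out hl hout hle
    rcases List.pairwise_cons.mp hl with ⟨hvt, ht⟩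
    simp only [List.foldl_cons]
    by_cases hnil : out = []
    · subst hnil
      rw [if_pos (Or.inl rfl)]
      simp only [List.nil_append]
      rcases ih [v] ht (by simp)
        (by intro a ha b hb; simp at ha; subst ha; exact hvt b hb) with ⟨hp, hm⟩
      exact ⟨hp, fun x => by rw [hm x]; simp⟩
    · have hlast := PySem.List.pyGetD_neg_one out (0 : Int) hnil
      by_cases heq : PySem.List.pyGetD out (-1) 0 = v
      · -- last element equals v: out is unchanged, v already a member
        rw [if_neg (fun h => h.elim hnil (fun h2 => h2 heq))]
        have hvmem : v ∈ out := by
          have := List.getLast_mem hnil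
          rwa [← hlast, heq] at this
        rcases ih out ht hout
          (fun a ha b hb => hle a ha b (List.mem_cons_of_mem _ hb)) with ⟨hp, hm⟩
        refine ⟨hp, fun x => ?_⟩
        rw [hm x]
        constructor
        · tauto
        · rintro (h | h)
          · exact Or.inl h
          · rcases List.mem_cons.mp h with rfl | h
            · exact Or.inl hvmem
            · exact Or.inr h
      · -- append v at the end
        rw [if_pos (Or.inr heq)]
        have hglt : out.getLast hnil < v := by
          rw [hlast] at heq
          exact lt_of_le_of_ne (hle _ (List.getLast_mem hnil) v (by simp)) heq
        have hout' : (out ++ [v]).Pairwise (· < ·) := by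
          apply List.pairwise_append.mpr
          refine ⟨hout, by simp, ?_⟩
          intro a ha b hb
          have hbv : b = v := by simpa using hb
          subst hbv
          exact lt_of_le_of_lt (chain_le_getLast out hout a ha hnil) hglt
        have hle' : ∀ a ∈ out ++ [v], ∀ b ∈ t, a ≤ b := by
          intro a ha b hb
          rcases List.mem_append.mp ha with h | h
          · exact hle a h b (List.mem_cons_of_mem _ hb)
          · simp at h; subst h; exact hvt b hb
        rcases ih (out ++ [v]) ht hout' hle' with ⟨hp, hm⟩
        refine ⟨hp, fun x => ?_⟩
        rw [hm x]
        simp [List.mem_append, or_assoc]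

-- sorted-then-set-then-sorted (A's tail) equals the single dedup pass over the sorted list (B's tail)
theorem sorted_set_eq_dedup_fold (P : List Int) :
    PySem.List.sorted (PySem.Set.ofList (PySem.List.sorted P (fun x => x))) (fun x => x)
      = (PySem.List.sorted P (fun x => x)).foldl
          (fun out x => if out = [] ∨ PySem.List.pyGetD out (-1) 0 ≠ x then out ++ [x] else out) [] := by
  have hsorted : (PySem.List.sorted P (fun x => x)).Pairwise (· ≤ ·) := by
    simpa using PySem.List.sorted_pairwise P (fun x => x)
  rcases dedup_fold_inv (PySem.List.sorted P (fun x => x)) [] hsorted (by simp) (by simp) with ⟨hp, hm⟩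
  apply PySem.List.sorted_eq_of_perm_of_pairwise_lt
  · apply (List.perm_ext_iff_of_nodup (hp.imp ne_of_lt) (PySem.Set.nodup_ofList _)).mpr
    intro x
    rw [hm x, PySem.Set.mem_ofList]
    simp
  · simpa using hp

theorem get_only_uniq_prices_for_flights_eq (outboundflights : List (String × List (String × Int))) (returnflights : List (String × List (String × Int))) :
    get_only_uniq_prices_for_flights outboundflights returnflights
      = get_only_uniq_prices_for_flights_alt outboundflights returnflights := by
  unfold get_only_uniq_prices_for_flights get_only_uniq_prices_for_flights_alt
  rw [PySem.List.foldl_append_singleton_eq_map, PySem.List.foldl_append_singleton_eq_map,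
    List.nil_append,
    PySem.Dict.values_eq_map_keys (PySem.Dict.ofList outboundflights) (PySem.Dict.nodup_keys_ofList _) [],
    PySem.Dict.values_eq_map_keys (PySem.Dict.ofList returnflights) (PySem.Dict.nodup_keys_ofList _) []]
  simp only [List.map_map]
  exact sorted_set_eq_dedup_fold _

-- ===== VERDICT (by name: the statement is the Claim_ definition above) =====
theorem get_only_uniq_prices_for_flights_spec : Claim_equal_get_only_uniq_prices_for_flights := by
  intro o r _ _
  unfold Spec_get_only_uniq_prices_for_flights
  exact get_only_uniq_prices_for_flights_eq o r
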